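-- pv_equiv track=rewrite | github.com/Jirehlov/SiglusSceneScriptUtility | src/siglus_ssu/decompiler.py | _drop_empty_same_target_placeholders
-- ===== SOURCE A (Python) =====
-- def _line_item(text, target_line=None):
--     try:
--         target = int(target_line) if target_line is not None else None
--     except Exception:
--         target = None
--     return (str(text or ""), target)
--
-- def _line_text(line):
--     if type(line) is tuple:
--         return str(line[0] or "") if line else ""
--     if type(line) is str:
--         return line
--     if isinstance(line, list) and line:
--         return str(line[0] or "")
--     return str(line or "")
--
-- def _line_target(line):
--     if type(line) is tuple:
--         if len(line) < 2:
--             return None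
--         try:
--             return int(line[1])
--         except Exception:
--             return None
--     if isinstance(line, list) and len(line) >= 2:
--         try:
--             return int(line[1])
--         except Exception:
--             return None
--     return None
--
-- def _drop_empty_same_target_placeholders(lines):
--     out = []
--     for line in lines or []:
--         text = _line_text(line)
--         target = _line_target(line)
--         if (
--             out
--             and (not str(text or ""))
--             and target is not None
--             and _line_target(out[-1]) is not None
--             and int(target) == int(_line_target(out[-1]))
--         ):
--             continue
--         out.append(_line_item(text, target))
--     return out
-- ===== SOURCE B (Python) =====
-- def _line_item(text, target_line=None):
--     try:
--         target = int(target_line) if target_line is not None else None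
--     except Exception:
--         target = None
--     return (str(text or ""), target)
--
-- def _line_text(line):
--     if type(line) is tuple:
--         return str(line[0] or "") if line else ""
--     if type(line) is str:
--         return line
--     if isinstance(line, list) and line:
--         return str(line[0] or "")
--     return str(line or "")
--
-- def _line_target(line):
--     if type(line) is tuple:
--         if len(line) < 2:
--             return None
--         try:
--             return int(line[1])
--         except Exception:
--             return None
--     if isinstance(line, list) and len(line) >= 2:
--         try:
--             return int(line[1])
--         except Exception:
--             return None
--     return None
--
-- def _drop_empty_same_target_placeholders(lines):
--     # Normalize, then split into maximal runs of equal target; a run with a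
--     # real target keeps its first item and only non-empty later items.
--     items = [(_line_text(l), _line_target(l)) for l in (lines or [])]
--     out = []
--     i, n = 0, len(items)
--     while i < n:
--         t = items[i][1]
--         j = i + 1
--         while j < n and items[j][1] == t:
--             j += 1
--         run = items[i:j]
--         kept = run if t is None else run[:1] + [it for it in run[1:] if it[0]]
--         out.extend(_line_item(tx, tg) for tx, tg in kept)
--         i = j
--     return out
-- ===== Notes on version B (the rewrite author's own statement) =====
-- stated objective: alternative
-- what changed: Replaces the compare-to-last-kept-output running filter with a two-phase pass: normalize all lines, split into maximal runs of equal target, then per run keep the first item and the non-empty rest (keeping whole runs with no target).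
import Mathlib
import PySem

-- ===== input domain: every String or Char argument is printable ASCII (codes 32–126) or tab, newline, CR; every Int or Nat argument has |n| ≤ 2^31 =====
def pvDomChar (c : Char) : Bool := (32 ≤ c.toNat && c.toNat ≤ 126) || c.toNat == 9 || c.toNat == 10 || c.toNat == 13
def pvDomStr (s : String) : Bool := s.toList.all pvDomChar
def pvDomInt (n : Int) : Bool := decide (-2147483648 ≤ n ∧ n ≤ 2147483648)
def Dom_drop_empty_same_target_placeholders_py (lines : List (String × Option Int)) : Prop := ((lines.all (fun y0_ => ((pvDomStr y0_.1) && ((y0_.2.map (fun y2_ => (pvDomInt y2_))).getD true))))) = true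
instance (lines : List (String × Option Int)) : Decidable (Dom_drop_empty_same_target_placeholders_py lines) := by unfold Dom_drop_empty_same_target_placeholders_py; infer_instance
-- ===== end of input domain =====

-- B replaces A's compare-to-last-kept running filter by normalize + group-into-runs-of-equal-target
-- + a per-run keep rule (alternative decomposition, same cost). Equivalence of return values is proved.

-- ===== PORT A =====
-- _line_text on a (String, Option Int) pair: str(line[0] or "") is the string itself (exact: "or" on a
-- string returns "" when empty, the string otherwise; str of a str is identity).
def pyLineText (line : String × Option Int) : String := line.1
-- _line_target on such a pair: int(line[1]) is the int when present; int(None) raises and yields None.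
def pyLineTarget (line : String × Option Int) : Option Int := line.2
-- _line_item: str(text or "") = text, int(target) = target when not None (exact on these types).
def pyLineItem (text : String) (target : Option Int) : String × Option Int := (text, target)
-- _line_target(out[-1]) — out is accessed only when nonempty; none otherwise (unreached).
def pyLastTarget (out : List (String × Option Int)) : Option Int :=
  match out.getLast? with
  | some l => pyLineTarget l
  | none => none

-- loop body of A's 'for line in lines'
def dropAStep (out : List (String × Option Int)) (line : String × Option Int) : List (String × Option Int) :=
  let text := pyLineText line
  let target := pyLineTarget line
  if out ≠ [] ∧ text = "" ∧ target ≠ none ∧ pyLastTarget out ≠ none ∧ target = pyLastTarget out then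
    out
  else
    out ++ [pyLineItem text target]

def drop_empty_same_target_placeholders_py (lines : List (String × Option Int)) : List (String × Option Int) :=
  lines.foldl dropAStep []

-- ===== PORT B =====
-- the inner while loop of Source B: split off the maximal run sharing the first item's target
def runsBy : List (String × Option Int) → List (List (String × Option Int))
  | [] => []
  | x :: xs =>
    (x :: xs.takeWhile (fun y => y.2 == x.2)) :: runsBy (xs.dropWhile (fun y => y.2 == x.2))
termination_by ls => ls.length
decreasing_by
  simp only [List.length_cons]
  exact Nat.lt_succ_of_le (List.length_dropWhile_le _ _)

-- per-run keep rule: 'run if t is None else run[:1] + [it for it in run[1:] if it[0]]'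
def keepRun (run : List (String × Option Int)) : List (String × Option Int) :=
  match run with
  | [] => []
  | h :: t => if h.2 = none then h :: t else h :: t.filter (fun y => y.1 ≠ "")

def drop_empty_same_target_placeholders_py_alt (lines : List (String × Option Int)) : List (String × Option Int) :=
  -- items = [( _line_text l, _line_target l )] is the identity on these pairs; out.extend(_line_item ...)
  -- re-emits each kept pair unchanged, so the whole body is flatMap of keepRun over the runs.
  ((runsBy (lines.map (fun l => (pyLineText l, pyLineTarget l)))).map keepRun).flatten

-- ===== PRECONDITION & SPEC =====
def Spec_drop_empty_same_target_placeholders_py (lines : List (String × Option Int)) (out : List (String × Option Int)) : Prop := out = drop_empty_same_target_placeholders_py_alt lines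
instance (lines : List (String × Option Int)) (out : List (String × Option Int)) : Decidable (Spec_drop_empty_same_target_placeholders_py lines out) := by unfold Spec_drop_empty_same_target_placeholders_py; infer_instance

-- ===== CLAIM (what is proved, stated in full; the proofs are below) =====
def Claim_equal_drop_empty_same_target_placeholders_py : Prop := ∀ (lines : List (String × Option Int)), Dom_drop_empty_same_target_placeholders_py lines → Spec_drop_empty_same_target_placeholders_py lines (drop_empty_same_target_placeholders_py lines)

-- ===== LEMMAS AND PROOFS =====

-- common reference program: one pass remembering the target of the PREVIOUS INPUT line
def specGo (prev : Option Int) : List (String × Option Int) → List (String × Option Int)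
  | [] => []
  | x :: xs => if x.1 = "" ∧ x.2 ≠ none ∧ x.2 = prev then specGo prev xs else x :: specGo x.2 xs

theorem specRun (t : Option Int) (run rest : List (String × Option Int))
    (h : ∀ y ∈ run, y.2 = t) :
    specGo t (run ++ rest)
      = (if t = none then run else run.filter (fun y => y.1 ≠ "")) ++ specGo t rest := by
  induction run with
  | nil => simp
  | cons y run' ih =>
    have hy : y.2 = t := h y (by simp)
    have ih' := ih (fun z hz => h z (by simp [hz]))
    rcases ht : t with _ | a
    · rw [ht] at hy ih'
      have hcond : ¬ (y.1 = "" ∧ y.2 ≠ none ∧ y.2 = (none : Option Int)) := by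
        rintro ⟨-, h2, h3⟩; exact h2 h3
      rw [List.cons_append, specGo, if_neg hcond, hy, ih']
      simp
    · rw [ht] at hy ih'
      by_cases he : y.1 = ""
      · have hcond : (y.1 = "" ∧ y.2 ≠ none ∧ y.2 = some a) := ⟨he, by rw [hy]; simp, hy⟩
        rw [List.cons_append, specGo, if_pos hcond, ih']
        simp [he]
      · have hcond : ¬ (y.1 = "" ∧ y.2 ≠ none ∧ y.2 = some a) := by
          rintro ⟨h1, -, -⟩; exact he h1
        rw [List.cons_append, specGo, if_neg hcond, hy, ih']
        simp [he]

theorem head_dropWhile_ne {α : Type} (p : α → Bool) (l : List α) :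
    ∀ x, (l.dropWhile p).head? = some x → p x = false := by
  induction l with
  | nil => intro x h; simp at h
  | cons a l ih =>
    intro x h
    by_cases hp : p a
    · rw [List.dropWhile_cons_of_pos hp] at h; exact ih x h
    · rw [List.dropWhile_cons_of_neg hp] at h
      simp at h; rw [← h]; exact Bool.eq_false_iff.mpr hp

theorem flat_runs_eq_spec (n : Nat) :
    ∀ (ls : List (String × Option Int)) (prev : Option Int), ls.length ≤ n →
    (∀ x, ls.head? = some x → prev = x.2 → x.2 = none) →
    ((runsBy ls).map keepRun).flatten = specGo prev ls := by
  induction n with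
  | zero =>
    intro ls prev hlen _
    have : ls = [] := List.length_eq_zero_iff.mp (Nat.le_zero.mp hlen)
    subst this; simp [runsBy, specGo]
  | succ m ih =>
    intro ls prev hlen hhd
    match ls with
    | [] => simp [runsBy, specGo]
    | x :: xs =>
      have hkeep : ¬ (x.1 = "" ∧ x.2 ≠ none ∧ x.2 = prev) := by
        rintro ⟨-, h2, h3⟩
        exact h2 (hhd x rfl h3.symm)
      have hx : specGo prev (x :: xs) = x :: specGo x.2 xs := by
        simp [specGo, hkeep]
      set p : (String × Option Int) → Bool := fun y => y.2 == x.2 with hp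
      have hsplit : xs = xs.takeWhile p ++ xs.dropWhile p := (List.takeWhile_append_dropWhile).symm
      have hrunmem : ∀ y ∈ xs.takeWhile p, y.2 = x.2 := by
        intro y hy
        have := List.mem_takeWhile_imp hy
        simpa [hp] using this
      have hrest1 : (xs.dropWhile p).length ≤ m := by
        have h1 := List.length_dropWhile_le p xs
        have h2 : xs.length ≤ m := by simpa using Nat.le_of_succ_le_succ hlen
        omega
      have hrest2 : ∀ y, (xs.dropWhile p).head? = some y → x.2 = y.2 → y.2 = none := by
        intro y hy heq
        have := head_dropWhile_ne p xs y hy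
        simp [hp, heq] at this
      have hrest := ih (xs.dropWhile p) x.2 hrest1 hrest2
      have hspec : specGo x.2 xs
          = (if x.2 = none then xs.takeWhile p else (xs.takeWhile p).filter (fun y => y.1 ≠ ""))
            ++ specGo x.2 (xs.dropWhile p) := by
        conv_lhs => rw [hsplit]
        exact specRun x.2 _ _ hrunmem
      rw [hx, hspec, ← hrest]
      show ((runsBy (x :: xs)).map keepRun).flatten = _
      rw [runsBy]
      simp only [List.map_cons, List.flatten_cons, ← hp, keepRun]
      by_cases hnone : x.2 = none
      · rw [if_pos hnone, if_pos hnone]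
        simp
      · rw [if_neg hnone, if_neg hnone]
        simp

theorem A_go : ∀ (ls out : List (String × Option Int)) (p : String × Option Int),
    out.getLast? = some p → ls.foldl dropAStep out = out ++ specGo p.2 ls := by
  intro ls
  induction ls with
  | nil => intro out p _; simp [specGo]
  | cons x xs ih =>
    intro out p hlast
    have hne : out ≠ [] := by intro h; rw [h] at hlast; simp at hlast
    have hlt : pyLastTarget out = p.2 := by simp [pyLastTarget, hlast, pyLineTarget]
    by_cases hc : x.1 = "" ∧ x.2 ≠ none ∧ x.2 = p.2
    · have hcond : (out ≠ [] ∧ pyLineText x = "" ∧ pyLineTarget x ≠ none ∧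
          pyLastTarget out ≠ none ∧ pyLineTarget x = pyLastTarget out) := by
        obtain ⟨h1, h2, h3⟩ := hc
        exact ⟨hne, h1, h2, by rw [hlt, ← h3]; exact h2, by rw [hlt]; exact h3⟩
      have hstep : dropAStep out x = out := by
        simp only [dropAStep]
        rw [if_pos hcond]
      simp only [List.foldl_cons, hstep, specGo]
      rw [if_pos hc]
      exact ih out p hlast
    · have hcond : ¬ (out ≠ [] ∧ pyLineText x = "" ∧ pyLineTarget x ≠ none ∧
          pyLastTarget out ≠ none ∧ pyLineTarget x = pyLastTarget out) := by
        rintro ⟨-, h1, h2, -, h4⟩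
        exact hc ⟨h1, h2, h4.trans hlt⟩
      have hstep : dropAStep out x = out ++ [x] := by
        simp only [dropAStep]
        rw [if_neg hcond]
        simp [pyLineItem, pyLineText, pyLineTarget]
      simp only [List.foldl_cons, hstep, specGo]
      rw [if_neg hc]
      have := ih (out ++ [x]) x (by simp)
      rw [this, List.append_assoc]
      simp

theorem A_eq_spec (ls : List (String × Option Int)) :
    drop_empty_same_target_placeholders_py ls = specGo none ls := by
  match ls with
  | [] => simp [drop_empty_same_target_placeholders_py, specGo]
  | x :: xs =>
    have hstep : dropAStep [] x = [x] := by
      simp only [dropAStep]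
      rw [if_neg (by rintro ⟨h, -⟩; exact h rfl)]
      simp [pyLineItem, pyLineText, pyLineTarget]
    have hkeep : ¬ (x.1 = "" ∧ x.2 ≠ none ∧ x.2 = none) := by rintro ⟨-, h2, h3⟩; exact h2 h3
    unfold drop_empty_same_target_placeholders_py
    rw [List.foldl_cons, hstep, A_go xs [x] x (by simp)]
    simp only [specGo]
    rw [if_neg hkeep]
    simp

theorem B_eq_spec (ls : List (String × Option Int)) :
    drop_empty_same_target_placeholders_py_alt ls = specGo none ls := by
  unfold drop_empty_same_target_placeholders_py_alt
  have hmap : ls.map (fun l => (pyLineText l, pyLineTarget l)) = ls := by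
    simp [pyLineText, pyLineTarget]
  rw [hmap]
  exact flat_runs_eq_spec ls.length ls none (le_refl _)
    (fun x _ h => by rw [← h])

-- ===== VERDICT (by name: the statement is the Claim_ definition above) =====
theorem drop_empty_same_target_placeholders_py_spec : Claim_equal_drop_empty_same_target_placeholders_py := by
  intro lines _
  unfold Spec_drop_empty_same_target_placeholders_py
  rw [A_eq_spec, B_eq_spec]
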